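-- pv_equiv track=rewrite | github.com/kevinkevin240101tmp/fw-diff-tool | main.py | build_changed_regions
-- ===== SOURCE A (Python) =====
-- def build_changed_regions(diffs):
--     regions = []
--     if not diffs:
--         return regions
--
--     start = diffs[0][0]
--     end = diffs[0][0]
--
--     for offset, _, _ in diffs[1:]:
--         if offset == end + 1:
--             end = offset
--         else:
--             regions.append((start, end))
--             start = offset
--             end = offset
--
--     regions.append((start, end))
--     return regions
-- ===== SOURCE B (Python) =====
-- def build_changed_regions(diffs):
--     # Structural recursion building the region list back-to-front:
--     # merge the first offset into the tail's first region when contiguous.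
--     if not diffs:
--         return []
--     first = diffs[0][0]
--     rest = build_changed_regions(diffs[1:])
--     if rest and rest[0][0] == first + 1:
--         return [(first, rest[0][1])] + rest[1:]
--     return [(first, first)] + rest
-- ===== Notes on version B (the rewrite author's own statement) =====
-- stated objective: alternative
-- what changed: Replaces the forward accumulator loop over diffs[1:] (mutable regions/start/end with an end+1 test) by a structural recursion that builds the region list back-to-front, merging the head offset into the tail's first region when contiguous.
import Mathlib
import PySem

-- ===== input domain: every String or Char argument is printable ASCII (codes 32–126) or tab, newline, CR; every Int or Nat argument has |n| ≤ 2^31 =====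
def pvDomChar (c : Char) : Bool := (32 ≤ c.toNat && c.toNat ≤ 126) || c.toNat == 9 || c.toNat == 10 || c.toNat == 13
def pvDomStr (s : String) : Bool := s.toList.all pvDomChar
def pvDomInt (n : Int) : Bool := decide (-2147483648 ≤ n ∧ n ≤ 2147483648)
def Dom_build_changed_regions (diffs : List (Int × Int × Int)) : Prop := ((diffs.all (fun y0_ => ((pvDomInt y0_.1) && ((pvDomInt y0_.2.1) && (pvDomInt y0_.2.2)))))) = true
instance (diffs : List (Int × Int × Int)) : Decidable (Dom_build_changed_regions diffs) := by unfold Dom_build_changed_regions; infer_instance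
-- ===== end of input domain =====

-- B is an alternative decomposition: A's forward accumulator loop is replaced by a
-- structural recursion building the region list back-to-front (merge head into tail's first region).

-- ===== PORT A =====
-- A: mutable (regions, start, end) state over diffs[1:], ported as a foldl over the same state.
def build_changed_regions (diffs : List (Int × Int × Int)) : List (Int × Int) :=
  match diffs with
  | [] => []
  | d0 :: rest =>
    let st := rest.foldl (fun (st : List (Int × Int) × Int × Int) d =>
      if d.1 = st.2.2 + 1 then (st.1, st.2.1, d.1)
      else (st.1 ++ [(st.2.1, st.2.2)], d.1, d.1)) ([], d0.1, d0.1)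
    st.1 ++ [(st.2.1, st.2.2)]

-- ===== PORT B =====
def build_changed_regions_alt (diffs : List (Int × Int × Int)) : List (Int × Int) :=
  match diffs with
  | [] => []
  | d0 :: rest =>
    let first := d0.1
    let r := build_changed_regions_alt rest
    match r with
    | (a, b) :: tl => if a = first + 1 then (first, b) :: tl else (first, first) :: (a, b) :: tl
    | [] => [(first, first)]

-- ===== PRECONDITION & SPEC =====
def Spec_build_changed_regions (diffs : List (Int × Int × Int)) (out : List (Int × Int)) : Prop := out = build_changed_regions_alt diffs
instance (diffs : List (Int × Int × Int)) (out : List (Int × Int)) : Decidable (Spec_build_changed_regions diffs out) := by unfold Spec_build_changed_regions; infer_instance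

-- ===== CLAIM (what is proved, stated in full; the proofs are below) =====
def Claim_equal_build_changed_regions : Prop := ∀ (diffs : List (Int × Int × Int)), Dom_build_changed_regions diffs → Spec_build_changed_regions diffs (build_changed_regions diffs)

-- ===== LEMMAS AND PROOFS =====

-- wrap a pending (start,end) region around an already-built region list
def pvCombine (s e : Int) (r : List (Int × Int)) : List (Int × Int) :=
  match r with
  | (a, b) :: tl => if a = e + 1 then (s, b) :: tl else (s, e) :: (a, b) :: tl
  | [] => [(s, e)]

theorem alt_cons (d0 : Int × Int × Int) (rest : List (Int × Int × Int)) :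
    build_changed_regions_alt (d0 :: rest) = pvCombine d0.1 d0.1 (build_changed_regions_alt rest) := by
  simp only [build_changed_regions_alt, pvCombine]

theorem combine_step (s e o : Int) (r : List (Int × Int)) (h : o = e + 1) :
    pvCombine s e (pvCombine o o r) = pvCombine s o r := by
  subst h
  rcases r with _ | ⟨⟨a, b⟩, tl⟩
  · simp [pvCombine]
  · simp only [pvCombine]
    by_cases h2 : a = e + 1 + 1 <;> simp [h2]

theorem combine_break (s e o : Int) (r : List (Int × Int)) (h : ¬ o = e + 1) :
    pvCombine s e (pvCombine o o r) = (s, e) :: pvCombine o o r := by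
  rcases r with _ | ⟨⟨a, b⟩, tl⟩
  · simp [pvCombine, h]
  · simp only [pvCombine]
    by_cases h2 : a = o + 1 <;> simp [h2, h]

theorem loop_eq (rest : List (Int × Int × Int)) :
    ∀ (regions : List (Int × Int)) (s e : Int),
      (let st := rest.foldl (fun (st : List (Int × Int) × Int × Int) d =>
          if d.1 = st.2.2 + 1 then (st.1, st.2.1, d.1)
          else (st.1 ++ [(st.2.1, st.2.2)], d.1, d.1)) (regions, s, e)
       st.1 ++ [(st.2.1, st.2.2)]) = regions ++ pvCombine s e (build_changed_regions_alt rest) := by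
  induction rest with
  | nil => intro regions s e; simp [build_changed_regions_alt, pvCombine]
  | cons d t ih =>
    intro regions s e
    simp only [List.foldl_cons]
    rw [alt_cons]
    by_cases h : d.1 = e + 1
    · simp only [if_pos h, ih, combine_step s e d.1 _ h]
    · simp only [if_neg h, ih, combine_break s e d.1 _ h]
      simp

-- ===== VERDICT (by name: the statement is the Claim_ definition above) =====
theorem build_changed_regions_spec : Claim_equal_build_changed_regions := by
  intro diffs _
  unfold Spec_build_changed_regions
  cases diffs with
  | nil => rfl
  | cons d0 rest =>
    rw [alt_cons]
    simpa using loop_eq rest [] d0.1 d0.1
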